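-- pv_equiv track=rewrite | github.com/Lamoreauxaj/cs378-final-project | src/code2seq.py | split_token
-- ===== SOURCE A (Python) =====
-- def split_token(token):
--     tokens = token.split(' ')
--     res = []
--     for token in tokens:
--         if '_' in token:
--             res += token.lower().split('_')
--         elif not token.isupper():
--             l = 0
--             for i in range(len(token) + 1):
--                 l += 1
--                 if i == len(token) or token[i].isupper():
--                     res.append(token[i - l + 1:i + 1])
--                     l = 0
--         else:
--             res.append(token)
--     return res
-- ===== SOURCE B (Python) =====
-- def _parts(word):
--     if '_' in word:
--         return word.lower().split('_')
--     if word.isupper():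
--         return [word]
--     out = []
--     rest = word
--     while True:
--         j = next((i + 1 for i, ch in enumerate(rest) if ch.isupper()), None)
--         if j is None:
--             out.append(rest)
--             return out
--         out.append(rest[:j])
--         rest = rest[j:]
--
--
-- def split_token(token):
--     return [p for w in token.split(' ') for p in _parts(w)]
-- ===== Notes on version B (the rewrite author's own statement) =====
-- stated objective: alternative
-- what changed: The camelCase branch is rewritten as repeated suffix peeling at the first uppercase letter (find-first-cut) instead of A's index/length-counter loop, and the outer accumulator loop becomes a flat list comprehension over a per-word helper.
import Mathlib
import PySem

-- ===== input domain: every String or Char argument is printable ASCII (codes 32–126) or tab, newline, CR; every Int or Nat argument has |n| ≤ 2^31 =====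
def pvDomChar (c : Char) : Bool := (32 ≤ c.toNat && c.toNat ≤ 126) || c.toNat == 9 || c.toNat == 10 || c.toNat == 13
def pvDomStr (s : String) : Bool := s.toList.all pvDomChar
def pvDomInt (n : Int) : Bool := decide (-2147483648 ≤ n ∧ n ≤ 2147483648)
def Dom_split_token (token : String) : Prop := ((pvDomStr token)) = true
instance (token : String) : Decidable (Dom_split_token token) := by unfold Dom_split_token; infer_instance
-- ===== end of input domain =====

-- B re-implements the camelCase branch by repeatedly cutting the word at the first uppercase letter
-- (find-first-cut suffix peeling, flatMapped over the space-separated words) instead of A's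
-- index/length-counter loop; objective: alternative.

-- Python str.isupper(): at least one cased character and no lowercase one — exact on the ASCII domain,
-- where the cased characters are exactly A–Z and a–z.  (Used by both ports.)
def pyStrIsupper (cs : List Char) : Bool :=
  cs.any PySem.Chars.isupper && !(cs.any PySem.Chars.islower)

-- ===== PORT A =====
-- token.split(' '): sep is non-empty, so split? is always `some` and the .getD [] default is unreachable.
-- token[i].isupper(): evaluated only when i < len(token) (short-circuit `or`), so pyGet? is always
-- `some` there and the .getD 'a' default is unreachable.
def split_token (token : String) : List String :=
  let tokens := (PySem.Str.split? token " ").getD []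
  tokens.foldl (fun res t =>
    if PySem.Str.isIn "_" t then
      res ++ (PySem.Str.split? (PySem.Str.lower t) "_").getD []
    else if !(pyStrIsupper t.toList) then
      let n : Int := PySem.Str.len t
      ((PySem.List.pyRange 0 (n + 1) 1).foldl
        (fun (st : List String × Int) i =>
          let l := st.2 + 1
          if i == n || PySem.Chars.isupper ((PySem.Str.pyGet? t i).getD 'a') then
            (st.1 ++ [PySem.Str.slice t (some (i - l + 1)) (some (i + 1))], (0 : Int))
          else (st.1, l)) (res, 0)).1
    else res ++ [t]) []

-- ===== PORT B =====
-- next((i+1 for i,ch in enumerate(rest) if ch.isupper()), None) is the first uppercase index: findIdx?.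
-- rest[:i+1] / rest[i+1:] with 0 ≤ i+1 ≤ len(rest) are exactly take/drop (PySem.List.slice_natCast).
def camelParts (rest : List Char) : List String :=
  match h : rest.findIdx? PySem.Chars.isupper with
  | none => [String.ofList rest]
  | some i => String.ofList (rest.take (i + 1)) :: camelParts (rest.drop (i + 1))
termination_by rest.length
decreasing_by
  have hi := (List.findIdx?_eq_some_iff_getElem.mp h).1
  simp only [List.length_drop]; omega

def pyParts (word : String) : List String :=
  if PySem.Str.isIn "_" word then (PySem.Str.split? (PySem.Str.lower word) "_").getD []
  else if pyStrIsupper word.toList then [word]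
  else camelParts word.toList

def split_token_alt (token : String) : List String :=
  ((PySem.Str.split? token " ").getD []).flatMap pyParts

-- ===== PRECONDITION & SPEC =====
def Spec_split_token (token : String) (out : List String) : Prop := out = split_token_alt token
instance (token : String) (out : List String) : Decidable (Spec_split_token token out) := by unfold Spec_split_token; infer_instance

-- ===== CLAIM =====
def Claim_equal_split_token : Prop := ∀ (token : String), Dom_split_token token → Spec_split_token token (split_token token)

-- ===== LEMMAS AND PROOFS =====

-- A's inner-loop body, named for the proofs (definitionally the lambda in split_token).
def stepA (t : String) (st : List String × Int) (i : Int) : List String × Int :=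
  let l := st.2 + 1
  if i == PySem.Str.len t || PySem.Chars.isupper ((PySem.Str.pyGet? t i).getD 'a') then
    (st.1 ++ [PySem.Str.slice t (some (i - l + 1)) (some (i + 1))], (0 : Int))
  else (st.1, l)

theorem camelParts_eq_none {rest : List Char}
    (h : rest.findIdx? PySem.Chars.isupper = none) :
    camelParts rest = [String.ofList rest] := by
  unfold camelParts; split <;> simp_all

theorem camelParts_eq_some {rest : List Char} {i : Nat}
    (h : rest.findIdx? PySem.Chars.isupper = some i) :
    camelParts rest = String.ofList (rest.take (i + 1)) :: camelParts (rest.drop (i + 1)) := by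
  conv_lhs => unfold camelParts
  split <;> simp_all

theorem camel_loop_aux (t : String) (d : Nat) :
    ∀ (c j : Nat) (res : List String), c ≤ j → j ≤ t.toList.length → t.toList.length - j = d →
    (∀ k, c ≤ k → k < j → PySem.Chars.isupper (t.toList.getD k 'a') = false) →
    ((PySem.List.pyRange (j : Int) ((PySem.Str.len t) + 1) 1).foldl (stepA t)
        (res, (j : Int) - (c : Int))).1
      = res ++ camelParts (t.toList.drop c) := by
  induction d with
  | zero =>
    intro c j res hcj hjn hd hscan
    have hj : j = t.toList.length := by omega
    rw [PySem.List.pyRange_one_cons (by simp only [PySem.Str.len_eq]; omega)]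
    simp only [List.foldl_cons]
    have hcond : ((j : Int) == PySem.Str.len t
        || PySem.Chars.isupper ((PySem.Str.pyGet? t (j : Int)).getD 'a')) = true := by
      have : ((j : Int) == PySem.Str.len t) = true := by
        rw [PySem.Str.len_eq, hj]
        exact beq_self_eq_true _
      rw [this, Bool.true_or]
    have hstep : stepA t (res, (j : Int) - (c : Int)) (j : Int)
        = (res ++ [PySem.Str.slice t (some ((c : Nat) : Int)) (some (((j + 1 : Nat)) : Int))], 0) := by
      unfold stepA
      rw [if_pos hcond]
      have e1 : (j : Int) - (((res, (j : Int) - (c : Int)) : List String × Int).2 + 1) + 1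
          = ((c : Nat) : Int) := by push_cast; ring
      have e2 : (j : Int) + 1 = ((j + 1 : Nat) : Int) := by push_cast; ring
      rw [e1, e2]
    rw [hstep, PySem.List.pyRange_one_eq_nil (by simp only [PySem.Str.len_eq]; omega)]
    simp only [List.foldl_nil]
    have hfind : (t.toList.drop c).findIdx? PySem.Chars.isupper = none := by
      rw [List.findIdx?_eq_none_iff]
      intro x hx
      obtain ⟨m, hm, rfl⟩ := List.mem_iff_getElem.mp hx
      rw [List.getElem_drop]
      have hlt : c + m < j := by simp only [List.length_drop] at hm; omega
      have := hscan (c + m) (by omega) hlt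
      rwa [List.getD_eq_getElem _ _ (by omega)] at this
    rw [camelParts_eq_none hfind]
    have hslice : PySem.Str.slice t (some ((c : Nat) : Int)) (some (((j + 1 : Nat)) : Int))
        = String.ofList (t.toList.drop c) := by
      unfold PySem.Str.slice
      rw [PySem.Chars.slice_eq_listSlice, PySem.List.slice_natCast]
      rw [List.take_of_length_le (by simp only [List.length_drop]; omega)]
    rw [hslice]
  | succ d ih =>
    intro c j res hcj hjn hd hscan
    have hjlt : j < t.toList.length := by omega
    rw [PySem.List.pyRange_one_cons (by simp only [PySem.Str.len_eq]; omega)]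
    simp only [List.foldl_cons]
    have hget : (PySem.Str.pyGet? t (j : Int)).getD 'a' = t.toList[j]'hjlt := by
      rw [PySem.Str.pyGet?_natCast, List.getElem?_eq_getElem hjlt]
      rfl
    by_cases hub : PySem.Chars.isupper (t.toList[j]'hjlt) = true
    · -- cut at the uppercase character
      have hcond : ((j : Int) == PySem.Str.len t
          || PySem.Chars.isupper ((PySem.Str.pyGet? t (j : Int)).getD 'a')) = true := by
        rw [hget, hub, Bool.or_true]
      have hstep : stepA t (res, (j : Int) - (c : Int)) (j : Int)
          = (res ++ [PySem.Str.slice t (some ((c : Nat) : Int)) (some (((j + 1 : Nat)) : Int))], 0) := by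
        unfold stepA
        rw [if_pos hcond]
        have e1 : (j : Int) - (((res, (j : Int) - (c : Int)) : List String × Int).2 + 1) + 1
            = ((c : Nat) : Int) := by push_cast; ring
        have e2 : (j : Int) + 1 = ((j + 1 : Nat) : Int) := by push_cast; ring
        rw [e1, e2]
      rw [hstep]
      have h0 : (0 : Int) = ((j + 1 : Nat) : Int) - ((j + 1 : Nat) : Int) := by push_cast; ring
      have hcast : (j : Int) + 1 = ((j + 1 : Nat) : Int) := by push_cast; ring
      rw [h0, hcast, ih (j + 1) (j + 1) _ (le_refl _) (by omega) (by omega)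
        (fun k h1 h2 => absurd h2 (by omega))]
      have hfind : (t.toList.drop c).findIdx? PySem.Chars.isupper = some (j - c) := by
        rw [List.findIdx?_eq_some_iff_getElem]
        refine ⟨by simp only [List.length_drop]; omega, ?_, ?_⟩
        · rw [List.getElem_drop]
          have : c + (j - c) = j := by omega
          simp only [this]; exact hub
        · intro m hm
          rw [List.getElem_drop]
          have := hscan (c + m) (by omega) (by omega)
          rw [List.getD_eq_getElem _ _ (by omega)] at this
          simp [this]
      rw [camelParts_eq_some hfind]
      have hdrop : (t.toList.drop c).drop (j - c + 1) = t.toList.drop (j + 1) := by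
        rw [List.drop_drop]
        congr 1
        omega
      have hslice : PySem.Str.slice t (some ((c : Nat) : Int)) (some (((j + 1 : Nat)) : Int))
          = String.ofList ((t.toList.drop c).take (j - c + 1)) := by
        unfold PySem.Str.slice
        rw [PySem.Chars.slice_eq_listSlice, PySem.List.slice_natCast]
        congr 2
        omega
      rw [hdrop, hslice]
      simp
    · -- not a cut: extend the current chunk
      have hcond : ((j : Int) == PySem.Str.len t
          || PySem.Chars.isupper ((PySem.Str.pyGet? t (j : Int)).getD 'a')) = false := by
        rw [hget, Bool.or_eq_false_iff]
        refine ⟨?_, by simpa using hub⟩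
        rw [beq_eq_false_iff_ne, PySem.Str.len_eq]
        intro h
        omega
      have hstep : stepA t (res, (j : Int) - (c : Int)) (j : Int)
          = (res, ((j + 1 : Nat) : Int) - (c : Int)) := by
        unfold stepA
        rw [if_neg (by rw [hcond]; exact Bool.false_ne_true)]
        have e : (((res, (j : Int) - (c : Int)) : List String × Int).2 + 1)
            = ((j + 1 : Nat) : Int) - (c : Int) := by push_cast; ring
        rw [e]
      rw [hstep]
      have hcast : (j : Int) + 1 = ((j + 1 : Nat) : Int) := by push_cast; ring
      rw [hcast, ih c (j + 1) res (by omega) (by omega) (by omega)]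
      intro k h1 h2
      by_cases hk : k < j
      · exact hscan k h1 hk
      · have : k = j := by omega
        subst this
        rw [List.getD_eq_getElem _ _ hjlt]
        simpa using hub

theorem camel_loop (t : String) (res : List String) :
    ((PySem.List.pyRange 0 ((PySem.Str.len t) + 1) 1).foldl (stepA t) (res, 0)).1
      = res ++ camelParts t.toList := by
  have := camel_loop_aux t t.toList.length 0 0 res (le_refl 0) (Nat.zero_le _) (by omega)
    (fun k h1 h2 => absurd h2 (by omega))
  simpa using this

theorem step_eq (t : String) (res : List String) :
    (if PySem.Str.isIn "_" t then
      res ++ (PySem.Str.split? (PySem.Str.lower t) "_").getD []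
    else if !(pyStrIsupper t.toList) then
      ((PySem.List.pyRange 0 ((PySem.Str.len t) + 1) 1).foldl (stepA t) (res, 0)).1
    else res ++ [t]) = res ++ pyParts t := by
  unfold pyParts
  by_cases h1 : PySem.Str.isIn "_" t = true
  · rw [if_pos h1, if_pos h1]
  · rw [if_neg h1, if_neg h1]
    by_cases h2 : pyStrIsupper t.toList = true
    · rw [if_neg (by simp [h2]), if_pos h2]
    · rw [if_pos (by simp [h2]), if_neg h2, camel_loop]

theorem foldA (ts : List String) (res : List String) :
    ts.foldl (fun res t =>
      if PySem.Str.isIn "_" t then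
        res ++ (PySem.Str.split? (PySem.Str.lower t) "_").getD []
      else if !(pyStrIsupper t.toList) then
        ((PySem.List.pyRange 0 ((PySem.Str.len t) + 1) 1).foldl (stepA t) (res, 0)).1
      else res ++ [t]) res = res ++ ts.flatMap pyParts := by
  simp only [step_eq]
  exact PySem.List.foldl_append_eq_flatMap pyParts ts res

-- ===== VERDICT =====
theorem split_token_spec : Claim_equal_split_token := by
  intro token _
  show split_token token = split_token_alt token
  have h : split_token token = ((PySem.Str.split? token " ").getD []).foldl (fun res t =>
      if PySem.Str.isIn "_" t then
        res ++ (PySem.Str.split? (PySem.Str.lower t) "_").getD []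
      else if !(pyStrIsupper t.toList) then
        ((PySem.List.pyRange 0 ((PySem.Str.len t) + 1) 1).foldl (stepA t) (res, 0)).1
      else res ++ [t]) [] := rfl
  rw [h, foldA]
  rfl
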